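-- pv_equiv track=rewrite | github.com/marwasha/vehicleControl | include/vehicleControl/supervisor.py | recurPerm
-- ===== SOURCE A (Python) =====
-- def recurPerm(accum, build, x):
--     i = len(build)
--     if i == len(x):
--         accum.append(build)
--         return accum
--     for s in [1, -1]:
--         temp = build[:]
--         temp.append(s*x[i])
--         accum = recurPerm(accum, temp, x)
--     return accum
-- ===== SOURCE B (Python) =====
-- def recurPerm(accum, build, x):
--     result = [build]
--     for i in range(len(build), len(x)):
--         result = [p + [s * x[i]] for p in result for s in (1, -1)]
--     accum.extend(result)
--     return accum
-- ===== Notes on version B (the rewrite author's own statement) =====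
-- stated objective: alternative
-- what changed: Replaces the binary recursion (call stack, one sign chosen per call) with a single iterative loop over the remaining indices that maintains an explicit worklist of partial vectors, doubling it per index, then extends accum once.
import Mathlib
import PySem

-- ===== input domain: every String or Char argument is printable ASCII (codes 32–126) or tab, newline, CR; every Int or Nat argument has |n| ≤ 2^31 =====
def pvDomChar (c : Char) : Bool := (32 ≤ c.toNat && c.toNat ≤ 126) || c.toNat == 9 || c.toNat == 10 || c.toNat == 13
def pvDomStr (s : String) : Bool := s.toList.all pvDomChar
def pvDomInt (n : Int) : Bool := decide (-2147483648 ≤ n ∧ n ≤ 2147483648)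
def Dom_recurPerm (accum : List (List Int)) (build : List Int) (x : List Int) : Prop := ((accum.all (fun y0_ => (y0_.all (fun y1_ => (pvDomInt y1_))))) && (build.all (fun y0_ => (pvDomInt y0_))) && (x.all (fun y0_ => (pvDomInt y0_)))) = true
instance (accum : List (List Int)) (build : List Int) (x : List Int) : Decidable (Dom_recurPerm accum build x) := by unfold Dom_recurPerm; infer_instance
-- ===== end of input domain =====

-- B replaces A's binary recursion by one loop over the remaining indices with an explicit
-- worklist of partial vectors (objective: alternative decomposition, same cost).
-- Both Pythons mutate accum in place (A appends, B extends); the equivalence proved here is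
-- about the returned value, which for both is that same mutated list.

-- ===== PORT A =====
def recurPerm (accum : List (List Int)) (build : List Int) (x : List Int) : List (List Int) :=
  if build.length = x.length then
    accum ++ [build]
  else
    -- x[i] with i = len(build); none = IndexError (outside Pre_), Python raises there
    match h : PySem.List.pyGet? x (build.length : Int) with
    | none => accum
    | some v =>
        recurPerm (recurPerm accum (build ++ [1 * v]) x) (build ++ [(-1) * v]) x
termination_by x.length - build.length
decreasing_by
  all_goals
    simp only [PySem.List.pyGet?_natCast] at h
    have hlt : build.length < x.length := (List.getElem?_eq_some_iff.mp h).1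
    simp [List.length_append]
    omega

-- ===== PORT B =====
def recurPerm_alt (accum : List (List Int)) (build : List Int) (x : List Int) : List (List Int) :=
  let result :=
    (PySem.List.pyRange (build.length : Int) (x.length : Int) 1).foldl
      (fun r i => r.flatMap (fun p =>
        [p ++ [1 * PySem.List.pyGetD x i 0], p ++ [(-1) * PySem.List.pyGetD x i 0]]))
      [build]
  accum ++ result

-- ===== PRECONDITION & SPEC =====
-- A raises IndexError when len(build) > len(x); those inputs are excluded.
def Pre_recurPerm (accum : List (List Int)) (build : List Int) (x : List Int) : Prop :=
  build.length ≤ x.length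
instance (accum : List (List Int)) (build : List Int) (x : List Int) : Decidable (Pre_recurPerm accum build x) := by unfold Pre_recurPerm; infer_instance

def pvWitness_recurPerm : List (List Int) × List Int × List Int := ([[0]], [1], [2, 3])

def Spec_recurPerm (accum : List (List Int)) (build : List Int) (x : List Int) (out : List (List Int)) : Prop := out = recurPerm_alt accum build x
instance (accum : List (List Int)) (build : List Int) (x : List Int) (out : List (List Int)) : Decidable (Spec_recurPerm accum build x out) := by unfold Spec_recurPerm; infer_instance

-- ===== CLAIM (what is proved, stated in full; the proofs are below) =====
def Claim_equal_recurPerm : Prop := ∀ (accum : List (List Int)) (build : List Int) (x : List Int), Dom_recurPerm accum build x → Pre_recurPerm accum build x → Spec_recurPerm accum build x (recurPerm accum build x)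

-- ===== LEMMAS AND PROOFS =====

-- B's loop body, abbreviated for the proofs
def sgnStep (x : List Int) (r : List (List Int)) (i : Int) : List (List Int) :=
  r.flatMap (fun p =>
    [p ++ [1 * PySem.List.pyGetD x i 0], p ++ [(-1) * PySem.List.pyGetD x i 0]])

lemma foldl_sgnStep_append (x : List Int) :
    ∀ (l : List Int) (r1 r2 : List (List Int)),
      l.foldl (sgnStep x) (r1 ++ r2)
        = l.foldl (sgnStep x) r1 ++ l.foldl (sgnStep x) r2 := by
  intro l
  induction l with
  | nil => intro r1 r2; simp
  | cons a t ih =>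
      intro r1 r2
      simp only [List.foldl_cons, sgnStep, List.flatMap_append]
      exact ih _ _

lemma recurPerm_main (x : List Int) :
    ∀ (n : Nat) (build : List Int) (accum : List (List Int)),
      build.length ≤ x.length → x.length - build.length = n →
      recurPerm accum build x
        = accum ++ (PySem.List.pyRange (build.length : Int) (x.length : Int) 1).foldl
            (sgnStep x) [build] := by
  intro n
  induction n with
  | zero =>
      intro build accum hle hn
      have heq : build.length = x.length := by omega
      rw [recurPerm]
      rw [PySem.List.pyRange_one_eq_nil (by exact_mod_cast heq.ge)]
      simp [heq]
  | succ n ih =>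
      intro build accum hle hn
      have hlt : build.length < x.length := by omega
      rw [recurPerm]
      have hne : ¬ build.length = x.length := by omega
      have hget : PySem.List.pyGet? x (build.length : Int) = some x[build.length] := by
        simp [PySem.List.pyGet?_natCast, List.getElem?_eq_getElem hlt]
      simp only [hne, if_false]
      set v := x[build.length] with hv
      split
      · next heq => rw [hget] at heq; cases heq
      next v' heq =>
      rw [hget] at heq
      obtain rfl : v' = v := (Option.some.inj heq).symm
      have hlen : ∀ c : Int, (build ++ [c]).length = build.length + 1 := by
        intro c; simp
      have hstep : sgnStep x [build] (build.length : Int)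
          = [build ++ [1 * v]] ++ [build ++ [(-1) * v]] := by
        simp [sgnStep, PySem.List.pyGetD_natCast, List.getD_eq_getElem?_getD,
          List.getElem?_eq_getElem hlt, hv]
      have hrhs : (PySem.List.pyRange (build.length : Int) (x.length : Int) 1).foldl
            (sgnStep x) [build]
          = (PySem.List.pyRange ((build.length : Int) + 1) (x.length : Int) 1).foldl
              (sgnStep x) [build ++ [1 * v]]
            ++ (PySem.List.pyRange ((build.length : Int) + 1) (x.length : Int) 1).foldl
              (sgnStep x) [build ++ [(-1) * v]] := by
        rw [PySem.List.pyRange_one_cons (show (build.length : Int) < (x.length : Int) by exact_mod_cast hlt)]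
        simp only [List.foldl_cons]
        rw [hstep, foldl_sgnStep_append]
      rw [ih (build ++ [1 * v]) accum (by simp; omega) (by simp; omega)]
      rw [ih (build ++ [(-1) * v]) _ (by simp; omega) (by simp; omega)]
      rw [hrhs]
      simp only [hlen]
      push_cast
      rw [List.append_assoc]

-- ===== VERDICT (by name: the statement is the Claim_ definition above) =====
theorem recurPerm_spec : Claim_equal_recurPerm := by
  intro accum build x _ hpre
  unfold Spec_recurPerm recurPerm_alt
  exact recurPerm_main x (x.length - build.length) build accum hpre rfl
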